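-- pv_equiv track=rewrite | github.com/DanilaSosnin/PiTPO | main_task7.py | count_visible_people
-- ===== SOURCE A (Python) =====
-- def count_visible_people(perm):
--     n = len(perm)
--     left_visible = 0
--     right_visible = 0
--
--     # Проверка видимости слева
--     max_left = -1
--     for i in range(n):
--         if perm[i] > max_left:
--             left_visible += 1
--             max_left = perm[i]
--
--     # Проверка видимости справа
--     max_right = -1
--     for i in range(n - 1, -1, -1):
--         if perm[i] > max_right:
--             right_visible += 1
--             max_right = perm[i]
--
--     return left_visible, right_visible
-- ===== SOURCE B (Python) =====
-- def count_visible_people(perm):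
--     # Declarative restatement: position i is visible from a side iff its value
--     # exceeds everything before it on that side (with A's floor of -1).
--     n = len(perm)
--     left = sum(1 for i in range(n) if perm[i] > max([-1, *perm[:i]]))
--     right = sum(1 for i in range(n) if perm[i] > max([-1, *perm[i + 1:]]))
--     return left, right
-- ===== Notes on version B (the rewrite author's own statement) =====
-- stated objective: alternative
-- what changed: Replaces A's two stateful scans with running-maximum accumulator variables by a declarative per-index formulation: each side's count is a comprehension sum over indices comparing perm[i] against the max of the slice on that side (with the same -1 floor), trading O(n) state-threading for O(n^2) slice maxima.
import Mathlib
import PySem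

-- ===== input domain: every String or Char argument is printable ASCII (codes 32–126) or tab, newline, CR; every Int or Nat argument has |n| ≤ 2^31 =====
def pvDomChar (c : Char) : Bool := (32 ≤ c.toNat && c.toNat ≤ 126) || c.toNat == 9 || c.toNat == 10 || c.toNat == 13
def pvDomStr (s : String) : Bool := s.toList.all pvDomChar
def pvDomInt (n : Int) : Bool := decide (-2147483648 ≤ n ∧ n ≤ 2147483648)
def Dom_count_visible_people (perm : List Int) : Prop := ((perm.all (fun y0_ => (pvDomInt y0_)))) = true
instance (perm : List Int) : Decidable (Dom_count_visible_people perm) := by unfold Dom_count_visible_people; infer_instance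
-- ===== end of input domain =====

-- B restates the two scans declaratively (per-index comparison against the max of the
-- slice on that side, with A's floor of -1); alternative formulation, not faster.

-- ===== PORT A =====
def count_visible_people (perm : List Int) : Int × Int :=
  let n : Int := PySem.List.len perm
  -- left scan: for i in range(n)
  let s1 := (PySem.List.pyRange 0 n 1).foldl
    (fun (st : Int × Int) i =>
      let x := PySem.List.pyGetD perm i 0
      if x > st.2 then (st.1 + 1, x) else st) (0, -1)
  -- right scan: for i in range(n - 1, -1, -1)
  let s2 := (PySem.List.pyRange (n - 1) (-1) (-1)).foldl
    (fun (st : Int × Int) i =>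
      let x := PySem.List.pyGetD perm i 0
      if x > st.2 then (st.1 + 1, x) else st) (0, -1)
  (s1.1, s2.1)

-- ===== PORT B =====
-- max([-1, *xs]) is ported as List.foldl max (-1) xs: exact for the resulting Int value.
def count_visible_people_alt (perm : List Int) : Int × Int :=
  let n : Int := PySem.List.len perm
  let left := ((PySem.List.pyRange 0 n 1).map (fun i =>
    if PySem.List.pyGetD perm i 0 > List.foldl max (-1) (PySem.List.slice perm none (some i))
    then (1 : Int) else 0)).sum
  let right := ((PySem.List.pyRange 0 n 1).map (fun i =>
    if PySem.List.pyGetD perm i 0 > List.foldl max (-1) (PySem.List.slice perm (some (i + 1)) none)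
    then (1 : Int) else 0)).sum
  (left, right)

-- ===== PRECONDITION & SPEC =====
def Spec_count_visible_people (perm : List Int) (out : Int × Int) : Prop := out = count_visible_people_alt perm
instance (perm : List Int) (out : Int × Int) : Decidable (Spec_count_visible_people perm out) := by unfold Spec_count_visible_people; infer_instance

-- ===== CLAIM (what is proved, stated in full; the proofs are below) =====
def Claim_equal_count_visible_people : Prop := ∀ (perm : List Int), Dom_count_visible_people perm → Spec_count_visible_people perm (count_visible_people perm)

-- ===== LEMMAS AND PROOFS =====

/-- Count of strict running-maxima of `xs` starting from floor `m`. -/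
def visCnt : List Int → Int → Int
  | [], _ => 0
  | x :: xs, m => (if x > m then 1 else 0) + visCnt xs (max m x)

/-- A's scan loop, folded structurally, computes `visCnt` and the running max. -/
theorem foldA_eq (xs : List Int) : ∀ (c m : Int),
    xs.foldl (fun (st : Int × Int) x => if x > st.2 then (st.1 + 1, x) else st) (c, m)
      = (c + visCnt xs m, xs.foldl max m) := by
  induction xs with
  | nil => intro c m; simp [visCnt]
  | cons x xs ih =>
    intro c m
    simp only [List.foldl_cons, visCnt]
    by_cases h : x > m
    · simp only [if_pos h, ih, max_eq_right (le_of_lt h)]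
      rw [add_assoc]
    · simp [h, ih, max_eq_left (le_of_not_gt h)]

theorem foldl_max_outer (xs : List Int) : ∀ (m x : Int),
    xs.foldl max (max m x) = max (xs.foldl max m) x := by
  induction xs with
  | nil => intro m x; rfl
  | cons y ys ih =>
    intro m x
    simp only [List.foldl_cons]
    rw [max_right_comm, ih]

theorem foldl_max_reverse (xs : List Int) : ∀ (m : Int),
    xs.reverse.foldl max m = xs.foldl max m := by
  induction xs with
  | nil => intro m; rfl
  | cons x ys ih =>
    intro m
    simp only [List.reverse_cons, List.foldl_append, List.foldl_cons, List.foldl_nil, ih]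
    rw [← foldl_max_outer]

theorem visCnt_append (xs : List Int) : ∀ (y m : Int),
    visCnt (xs ++ [y]) m = visCnt xs m + (if y > xs.foldl max m then 1 else 0) := by
  induction xs with
  | nil => intro y m; simp [visCnt]
  | cons x xs ih =>
    intro y m
    simp only [List.cons_append, visCnt, List.foldl_cons, ih]
    ring_nf

/-- B's left sum over `List.range`, with general floor, equals `visCnt`. -/
theorem sumLeft (perm : List Int) : ∀ (m : Int),
    ((List.range perm.length).map (fun k =>
      if perm.getD k 0 > List.foldl max m (perm.take k) then (1 : Int) else 0)).sum
      = visCnt perm m := by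
  induction perm with
  | nil => intro m; simp [visCnt]
  | cons x xs ih =>
    intro m
    rw [List.length_cons, List.range_succ_eq_map]
    simp only [List.map_cons, List.map_map, List.sum_cons, Function.comp_def,
      List.getD_cons_succ, List.getD_cons_zero, List.take_zero, List.take_succ_cons,
      List.foldl_nil, List.foldl_cons, visCnt]
    rw [ih (max m x)]

/-- B's right sum over `List.range` equals `visCnt` of the reversed list. -/
theorem sumRight (perm : List Int) :
    ((List.range perm.length).map (fun k =>
      if perm.getD k 0 > List.foldl max (-1) (perm.drop (k + 1)) then (1 : Int) else 0)).sum
      = visCnt perm.reverse (-1) := by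
  induction perm with
  | nil => simp [visCnt]
  | cons x xs ih =>
    rw [List.length_cons, List.range_succ_eq_map]
    simp only [List.map_cons, List.map_map, List.sum_cons, Function.comp_def,
      List.getD_cons_succ, List.getD_cons_zero, List.drop_succ_cons, List.drop_zero]
    rw [ih, List.reverse_cons, visCnt_append, foldl_max_reverse]
    ring_nf

/-- A's port computes `(visCnt perm (-1), visCnt perm.reverse (-1))`. -/
theorem portA_eq (perm : List Int) :
    count_visible_people perm = (visCnt perm (-1), visCnt perm.reverse (-1)) := by
  unfold count_visible_people
  simp only [PySem.List.len_eq]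
  have h1 : (PySem.List.pyRange 0 (perm.length : Int) 1).foldl
      (fun (st : Int × Int) i =>
        let x := PySem.List.pyGetD perm i 0
        if x > st.2 then (st.1 + 1, x) else st) (0, -1)
      = (visCnt perm (-1), perm.foldl max (-1)) := by
    rw [PySem.List.foldl_pyRange_zero_pyGetD' perm 0
      (fun (st : Int × Int) x => if x > st.2 then (st.1 + 1, x) else st) (0, -1)]
    simpa using foldA_eq perm 0 (-1)
  have hrange : PySem.List.pyRange ((perm.length : Int) - 1) (-1) (-1)
      = (PySem.List.pyRange 0 (perm.length : Int) 1).reverse := by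
    rw [PySem.List.pyRange_neg_one_eq_reverse]
    norm_num
  have h2 : (PySem.List.pyRange ((perm.length : Int) - 1) (-1) (-1)).foldl
      (fun (st : Int × Int) i =>
        let x := PySem.List.pyGetD perm i 0
        if x > st.2 then (st.1 + 1, x) else st) (0, -1)
      = (visCnt perm.reverse (-1), perm.reverse.foldl max (-1)) := by
    rw [hrange]
    rw [show (fun (st : Int × Int) i =>
        let x := PySem.List.pyGetD perm i 0
        if x > st.2 then (st.1 + 1, x) else st)
      = (fun (st : Int × Int) i =>
        (fun (st : Int × Int) x => if x > st.2 then (st.1 + 1, x) else st) st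
          (PySem.List.pyGetD perm i 0)) from rfl]
    have hm : List.foldl (fun (st : Int × Int) x => if x > st.2 then (st.1 + 1, x) else st)
        ((0 : Int), (-1 : Int))
        (((PySem.List.pyRange 0 (perm.length : Int)).reverse).map
          (fun i => PySem.List.pyGetD perm i 0))
        = List.foldl (fun (st : Int × Int) i =>
            (fun (st : Int × Int) x => if x > st.2 then (st.1 + 1, x) else st) st
              (PySem.List.pyGetD perm i 0)) ((0 : Int), (-1 : Int))
          ((PySem.List.pyRange 0 (perm.length : Int)).reverse) := List.foldl_map
    rw [← hm]
    rw [List.map_reverse, PySem.List.map_pyGetD_pyRange_zero' perm 0]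
    exact foldA_eq perm.reverse 0 (-1) |>.trans (by simp)
  simp only [h1, h2]

/-- B's port computes the same pair. -/
theorem portB_eq (perm : List Int) :
    count_visible_people_alt perm = (visCnt perm (-1), visCnt perm.reverse (-1)) := by
  unfold count_visible_people_alt
  simp only [PySem.List.len_eq, PySem.List.pyRange_zero_natCast, List.map_map]
  have hl : ∀ k : Nat,
      (if PySem.List.pyGetD perm (k : Int) 0 >
          List.foldl max (-1) (PySem.List.slice perm none (some (k : Int)))
        then (1 : Int) else 0)
      = (if perm.getD k 0 > List.foldl max (-1) (perm.take k) then (1 : Int) else 0) := by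
    intro k
    rw [PySem.List.pyGetD_natCast, PySem.List.slice_to_natCast]
  have hr : ∀ k : Nat,
      (if PySem.List.pyGetD perm (k : Int) 0 >
          List.foldl max (-1) (PySem.List.slice perm (some ((k : Int) + 1)) none)
        then (1 : Int) else 0)
      = (if perm.getD k 0 > List.foldl max (-1) (perm.drop (k + 1)) then (1 : Int) else 0) := by
    intro k
    have : ((k : Int) + 1) = ((k + 1 : Nat) : Int) := by push_cast; ring
    rw [PySem.List.pyGetD_natCast, this, PySem.List.slice_from_natCast]
  simp only [Function.comp_def, hl, hr]
  rw [sumLeft perm (-1), sumRight perm]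

-- ===== VERDICT (by name: the statement is the Claim_ definition above) =====
theorem count_visible_people_spec : Claim_equal_count_visible_people := by
  intro perm _
  unfold Spec_count_visible_people
  rw [portA_eq, portB_eq]
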